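-- pv_equiv track=rewrite | github.com/apache/mxnet | example/speech_recognition/stt_bi_graphemes_util.py | generate_bi_graphemes_label
-- ===== SOURCE A (Python) =====
-- def split_every(n, label):
--     index = 0
--     if index <= len(label) - 1 <= index + n - 1:
--         yield label[index:len(label)]
--         index = index + n
--     while index+n-1 <= len(label)-1:
--         yield label[index:index+n]
--         index = index + n
--         if index <= len(label)-1 <= index+n-1:
--             yield label[index:len(label)]
--             index=index+n
--
-- def generate_bi_graphemes_label(label):
--     label_bi_graphemes = []
--     label = label.split(' ')
--     last_index = len(label) - 1
--     for label_index, item in enumerate(label):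
--         for pair in split_every(2, item):
--             label_bi_graphemes.append(pair)
--         if label_index != last_index:
--             label_bi_graphemes.append(" ")
--     return label_bi_graphemes
-- ===== SOURCE B (Python) =====
-- def generate_bi_graphemes_label(label):
--     out = []
--     buf = ""
--     for ch in label:
--         if ch == ' ':
--             if buf:
--                 out.append(buf)
--                 buf = ""
--             out.append(" ")
--         else:
--             buf += ch
--             if len(buf) == 2:
--                 out.append(buf)
--                 buf = ""
--     if buf:
--         out.append(buf)
--     return out
-- ===== Notes on version B (the rewrite author's own statement) =====
-- stated objective: simpler
-- what changed: Replaces split-on-space plus the index-juggling split_every generator with a single left-to-right scan holding a 2-char buffer that flushes on a full pair or a space.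
import Mathlib
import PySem

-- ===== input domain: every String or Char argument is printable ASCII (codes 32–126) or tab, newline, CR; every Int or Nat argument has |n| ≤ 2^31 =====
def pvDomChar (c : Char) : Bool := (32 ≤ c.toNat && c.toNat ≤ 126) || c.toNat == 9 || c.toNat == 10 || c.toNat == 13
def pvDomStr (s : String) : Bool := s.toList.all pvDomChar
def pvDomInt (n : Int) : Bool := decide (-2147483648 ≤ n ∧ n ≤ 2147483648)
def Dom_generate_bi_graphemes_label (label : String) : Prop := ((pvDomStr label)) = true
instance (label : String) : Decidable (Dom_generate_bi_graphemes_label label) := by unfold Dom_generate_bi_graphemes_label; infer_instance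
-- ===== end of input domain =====

-- B replaces split-on-space plus the index-juggling split_every generator with a single
-- left-to-right scan holding a 2-char buffer flushed on a full pair or a space (objective: simpler).

-- ===== PORT A =====
-- the while-loop of split_every; fuel bounds the iterations (index strictly grows by n = 2 at each call site)
def splitEveryLoop (n : Int) (label : String) (fuel : Nat) (index : Int) : List String :=
  match fuel with
  | 0 => []
  | fuel + 1 =>
    if index + n - 1 ≤ PySem.Str.len label - 1 then
      let chunk := PySem.Str.slice label (some index) (some (index + n))
      let index2 := index + n
      if index2 ≤ PySem.Str.len label - 1 ∧ PySem.Str.len label - 1 ≤ index2 + n - 1 then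
        chunk :: PySem.Str.slice label (some index2) (some (PySem.Str.len label))
              :: splitEveryLoop n label fuel (index2 + n)
      else
        chunk :: splitEveryLoop n label fuel index2
    else []

-- split_every(n, label): the initial 'if' then the while loop
def splitEvery (n : Int) (label : String) : List String :=
  if 0 ≤ PySem.Str.len label - 1 ∧ PySem.Str.len label - 1 ≤ 0 + n - 1 then
    PySem.Str.slice label (some 0) (some (PySem.Str.len label))
      :: splitEveryLoop n label (label.toList.length + 1) (0 + n)
  else
    splitEveryLoop n label (label.toList.length + 1) 0

def generate_bi_graphemes_label (label : String) : List String :=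
  let labelParts := (PySem.Str.split? label " ").getD []   -- sep ' ' is nonempty, split? is some
  let last_index : Int := (labelParts.length : Int) - 1
  (PySem.List.enumerate labelParts 0).foldl
    (fun acc p =>
      let acc := acc ++ splitEvery 2 p.2
      if p.1 ≠ last_index then acc ++ [" "] else acc)
    []

-- ===== PORT B =====
-- the loop body of Source B; state = (out, buf), buf kept as List Char
def altStep (st : List String × List Char) (ch : Char) : List String × List Char :=
  if ch = ' ' then
    let out := if st.2 ≠ [] then st.1 ++ [String.ofList st.2] else st.1
    (out ++ [" "], [])
  else
    let buf := st.2 ++ [ch]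
    if buf.length = 2 then (st.1 ++ [String.ofList buf], []) else (st.1, buf)

def generate_bi_graphemes_label_alt (label : String) : List String :=
  let st := label.toList.foldl altStep ([], [])
  if st.2 ≠ [] then st.1 ++ [String.ofList st.2] else st.1

-- ===== PRECONDITION & SPEC =====
def Spec_generate_bi_graphemes_label (label : String) (out : List String) : Prop := out = generate_bi_graphemes_label_alt label
instance (label : String) (out : List String) : Decidable (Spec_generate_bi_graphemes_label label out) := by unfold Spec_generate_bi_graphemes_label; infer_instance

-- ===== CLAIM (what is proved, stated in full; the proofs are below) =====
def Claim_equal_generate_bi_graphemes_label : Prop := ∀ (label : String), Dom_generate_bi_graphemes_label label → Spec_generate_bi_graphemes_label label (generate_bi_graphemes_label label)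

-- ===== LEMMAS AND PROOFS =====

-- first word / remaining words of a split on single spaces
def swSplit : List Char → List Char × List (List Char)
  | [] => ([], [])
  | c :: t => if c = ' ' then ([], (swSplit t).1 :: (swSplit t).2) else (c :: (swSplit t).1, (swSplit t).2)

-- chunk a word into pairs, odd last char alone
def chunks2 : List Char → List String
  | [] => []
  | [a] => [String.ofList [a]]
  | a :: b :: t => String.ofList [a, b] :: chunks2 t

def tailJoin : List (List Char) → List String
  | [] => []
  | w :: ws => " " :: (chunks2 w ++ tailJoin ws)

def joinW : List (List Char) → List String
  | [] => []
  | w :: ws => chunks2 w ++ tailJoin ws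

-- functional form of B's scan
def scanB : List Char → List Char → List String
  | buf, [] => if buf ≠ [] then [String.ofList buf] else []
  | buf, c :: t =>
    if c = ' ' then (if buf ≠ [] then [String.ofList buf] else []) ++ " " :: scanB [] t
    else if (buf ++ [c]).length = 2 then String.ofList (buf ++ [c]) :: scanB [] t
    else scanB (buf ++ [c]) t

theorem splitOn_go_space (fuel : Nat) :
    ∀ (l cur : List Char) (acc : List (List Char)),
      l.length < fuel →
      PySem.Chars.splitOn.go [' '] fuel l cur acc =
        acc.reverse ++ (cur.reverse ++ (swSplit l).1) :: (swSplit l).2 := by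
  induction fuel with
  | zero => intro l cur acc h; omega
  | succ fuel ih =>
    intro l cur acc h
    cases l with
    | nil => simp [PySem.Chars.splitOn.go, swSplit]
    | cons c rest =>
      by_cases hc : c = ' '
      · subst hc
        have := ih rest [] (cur.reverse :: acc) (by simpa using Nat.lt_of_succ_lt_succ h)
        simp only [PySem.Chars.splitOn.go, List.isPrefixOf] at *
        simp_all [swSplit]
      · have := ih rest (c :: cur) acc (by simpa using Nat.lt_of_succ_lt_succ h)
        have hc' : ¬ ' ' = c := fun h' => hc h'.symm
        simp only [PySem.Chars.splitOn.go, List.isPrefixOf] at *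
        simp_all [swSplit]

theorem splitOn_space (l : List Char) :
    PySem.Chars.splitOn l [' '] = (swSplit l).1 :: (swSplit l).2 := by
  have := splitOn_go_space (l.length + 1) l [] [] (by omega)
  simpa [PySem.Chars.splitOn] using this

theorem exists_drop2 (L : List Char) (i : Nat) (h : i + 2 ≤ L.length) :
    ∃ a b, L.drop i = a :: b :: L.drop (i + 2) := by
  have h2 : 2 ≤ (L.drop i).length := by simp; omega
  match hd : L.drop i with
  | [] => rw [hd] at h2; simp at h2
  | [a] => rw [hd] at h2; simp at h2
  | a :: b :: t =>
    have h24 : L.drop (i + 2) = t := by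
      have h0 : (a :: b :: t).drop 2 = t := rfl
      rw [← hd] at h0
      rwa [List.drop_drop] at h0
    exact ⟨a, b, by rw [h24]⟩

theorem splitEveryLoop_eq (s : String) (fuel : Nat) :
    ∀ (i : Nat), s.toList.length ≤ i + fuel → s.toList.length - i ≠ 1 →
      splitEveryLoop 2 s fuel (i : Int) = chunks2 (s.toList.drop i) := by
  induction fuel with
  | zero =>
    intro i h h1
    have hd : s.toList.drop i = [] := List.drop_eq_nil_of_le h
    simp [splitEveryLoop, hd, chunks2]
  | succ fuel ih =>
    intro i h h1
    by_cases hr : i + 2 ≤ s.toList.length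
    · -- at least two chars remain: the while-guard is true
      obtain ⟨a, b, hab⟩ := exists_drop2 s.toList i hr
      have hguard : ((i : Int)) + 2 - 1 ≤ PySem.Str.len s - 1 := by
        simp only [PySem.Str.len]; omega
      have hchunk : PySem.Str.slice s (some (i : Int)) (some ((i : Int) + 2))
          = String.ofList [a, b] := by
        have : ((i : Int) + 2) = ((i + 2 : Nat) : Int) := by push_cast; ring
        apply String.toList_injective
        rw [PySem.Str.toList_slice, PySem.Chars.slice_eq_listSlice, this,
          PySem.List.slice_natCast, String.toList_ofList]
        have : i + 2 - i = 2 := by omega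
        rw [this, hab]
        rfl
      by_cases h34 : (i : Int) + 2 ≤ PySem.Str.len s - 1 ∧ PySem.Str.len s - 1 ≤ (i : Int) + 2 + 2 - 1
      · -- 3 or 4 chars remained: chunk, then the tail chunk, then the loop ends
        have h3 : i + 3 ≤ s.toList.length ∧ s.toList.length ≤ i + 4 := by
          have hl : s.toList.length = s.length := by simp
          simp only [PySem.Str.len] at h34; omega
        have htail : PySem.Str.slice s (some ((i : Int) + 2)) (some (PySem.Str.len s))
            = String.ofList (s.toList.drop (i + 2)) := by
          have h2 : ((i : Int) + 2) = ((i + 2 : Nat) : Int) := by push_cast; ring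
          apply String.toList_injective
          rw [PySem.Str.toList_slice, PySem.Chars.slice_eq_listSlice, h2, PySem.Str.len,
            PySem.List.slice_natCast, String.toList_ofList]
          apply List.take_of_length_le
          simp only [List.length_drop]
          omega
        have hrest : splitEveryLoop 2 s fuel ((i : Int) + 2 + 2) = [] := by
          have h2 : ((i : Int) + 2 + 2) = ((i + 4 : Nat) : Int) := by push_cast; ring
          have hl : s.toList.length = s.length := by simp
          rw [h2, ih (i + 4) (by omega) (by omega),
            List.drop_eq_nil_of_le (by omega)]
          rfl
        rw [splitEveryLoop, if_pos hguard, if_pos h34, hchunk, htail, hrest, hab]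
        have h24 : s.toList.drop (i + 2) = (s.toList.drop i).drop 2 := by rw [List.drop_drop]
        rw [h24, hab]
        -- the remaining 1 or 2 chars form the final chunk
        match ht : s.toList.drop (i + 2) with
        | [] =>
          exfalso
          have hl : s.toList.length = s.length := by simp
          have := congrArg List.length ht
          simp at this; omega
        | [x] => rw [h24, hab] at ht; simp at ht; simp [chunks2]
        | [x, y] => rw [h24, hab] at ht; simp at ht; simp [chunks2]
        | x :: y :: z :: t =>
          exfalso
          have hl : s.toList.length = s.length := by simp
          have := congrArg List.length ht
          simp at this; omega
      · -- 2 or ≥ 5 chars remained: chunk and continue the loop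
        have hrest : splitEveryLoop 2 s fuel ((i : Int) + 2) = chunks2 (s.toList.drop (i + 2)) := by
          have h2 : ((i : Int) + 2) = ((i + 2 : Nat) : Int) := by push_cast; ring
          have hne : s.toList.length - (i + 2) ≠ 1 := by
            have hl : s.toList.length = s.length := by simp
            simp only [PySem.Str.len] at h34; omega
          rw [h2, ih (i + 2) (by omega) hne]
        rw [splitEveryLoop, if_pos hguard, if_neg h34, hchunk, hrest, hab]
        have h24 : s.toList.drop (i + 2) = (s.toList.drop i).drop 2 := by rw [List.drop_drop]
        rw [h24, hab]
        rfl
    · -- 0 chars remain (1 excluded by hypothesis): guard is false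
      have h0 : s.toList.length ≤ i := by omega
      have hguard : ¬ ((i : Int)) + 2 - 1 ≤ PySem.Str.len s - 1 := by
        simp only [PySem.Str.len]; omega
      rw [splitEveryLoop, if_neg hguard, List.drop_eq_nil_of_le h0]
      rfl

theorem chunks2_small (l : List Char) (h1 : 1 ≤ l.length) (h2 : l.length ≤ 2) :
    chunks2 l = [String.ofList l] := by
  match l with
  | [a] => rfl
  | [a, b] => rfl
  | [] => simp at h1
  | a :: b :: c :: t => simp at h2

theorem splitEvery_eq (s : String) : splitEvery 2 s = chunks2 s.toList := by
  have hl : s.toList.length = s.length := by simp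
  by_cases h12 : (0 : Int) ≤ PySem.Str.len s - 1 ∧ PySem.Str.len s - 1 ≤ 0 + 2 - 1
  · have hn : 1 ≤ s.toList.length ∧ s.toList.length ≤ 2 := by
      simp only [PySem.Str.len] at h12; omega
    have hwhole : PySem.Str.slice s (some 0) (some (PySem.Str.len s)) = s := by
      apply String.toList_injective
      rw [PySem.Str.toList_slice, PySem.Chars.slice_eq_listSlice, PySem.Str.len]
      have h0 : (0 : Int) = ((0 : Nat) : Int) := rfl
      rw [h0, PySem.List.slice_natCast]
      simp
    have hloop : splitEveryLoop 2 s (s.toList.length + 1) ((0 : Int) + 2) = [] := by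
      have h2 : ((0 : Int) + 2) = ((2 : Nat) : Int) := by norm_num
      rw [h2, splitEveryLoop_eq s _ 2 (by omega) (by omega),
        List.drop_eq_nil_of_le (by omega)]
      rfl
    rw [splitEvery, if_pos h12, hwhole, hloop, chunks2_small s.toList hn.1 hn.2]
    simp
  · have hn : s.toList.length = 0 ∨ 3 ≤ s.toList.length := by
      simp only [PySem.Str.len] at h12; push_cast at h12; omega
    rw [splitEvery, if_neg h12]
    have h0 : (0 : Int) = ((0 : Nat) : Int) := rfl
    rw [h0, splitEveryLoop_eq s _ 0 (by omega) (by omega)]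
    rfl

theorem foldA_eq (last : Int) :
    ∀ (items : List String) (start : Int) (acc : List String),
      last = start + items.length - 1 →
      (PySem.List.enumerate items start).foldl
        (fun acc p =>
          let acc := acc ++ splitEvery 2 p.2
          if p.1 ≠ last then acc ++ [" "] else acc) acc
      = acc ++ joinW (items.map String.toList) := by
  intro items
  induction items with
  | nil => intro start acc h; simp [PySem.List.enumerate_nil, joinW]
  | cons w ws ih =>
    intro start acc h
    rw [PySem.List.enumerate_cons, List.foldl_cons]
    have happ : (let acc := acc ++ splitEvery 2 (Prod.snd (start, w))
          if Prod.fst (start, w) ≠ last then acc ++ [" "] else acc)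
        = if start ≠ last then acc ++ splitEvery 2 w ++ [" "] else acc ++ splitEvery 2 w := rfl
    rw [happ]
    cases ws with
    | nil =>
      have hlast : start = last := by simp at h; omega
      rw [if_neg (by simp [hlast]), PySem.List.enumerate_nil, List.foldl_nil]
      simp [joinW, tailJoin, splitEvery_eq]
    | cons v vs =>
      have hne : start ≠ last := by simp at h; omega
      rw [if_pos hne, ih (start + 1) _ (by simp at h ⊢; omega)]
      simp only [List.map_cons, joinW, splitEvery_eq]
      have htj : tailJoin (v.toList :: vs.map String.toList)
          = " " :: joinW (v.toList :: vs.map String.toList) := rfl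
      rw [htj]
      simp [joinW, List.append_assoc]

theorem foldB_eq :
    ∀ (l : List Char) (out : List String) (buf : List Char),
      (let st := l.foldl altStep (out, buf)
       if st.2 ≠ [] then st.1 ++ [String.ofList st.2] else st.1)
      = out ++ scanB buf l := by
  intro l
  induction l with
  | nil =>
    intro out buf
    by_cases hb : buf = [] <;> simp [scanB, hb]
  | cons c t ih =>
    intro out buf
    simp only [List.foldl_cons]
    by_cases hc : c = ' '
    · have hstep : altStep (out, buf) c
          = ((if buf ≠ [] then out ++ [String.ofList buf] else out) ++ [" "], []) := by
        simp [altStep, hc]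
      rw [hstep, ih]
      by_cases hb : buf = [] <;> simp [scanB, hb, hc]
    · by_cases h2 : (buf ++ [c]).length = 2
      · have hb1 : buf.length = 1 := by simp at h2; omega
        have hstep : altStep (out, buf) c = (out ++ [String.ofList (buf ++ [c])], []) := by
          simp [altStep, hc, hb1]
        rw [hstep, ih]
        simp [scanB, hc, hb1]
      · have hb1 : ¬ buf.length = 1 := by simp at h2; omega
        have hstep : altStep (out, buf) c = (out, buf ++ [c]) := by
          simp [altStep, hc, hb1]
        rw [hstep, ih]
        simp [scanB, hc, hb1]

theorem scanB_eq (l : List Char) :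
    ∀ (buf : List Char), buf.length ≤ 1 →
      scanB buf l = joinW ((buf ++ (swSplit l).1) :: (swSplit l).2) := by
  induction l with
  | nil =>
    intro buf hb
    match buf with
    | [] => simp [scanB, swSplit, joinW, tailJoin, chunks2]
    | [b] => simp [scanB, swSplit, joinW, tailJoin, chunks2]
  | cons c t ih =>
    intro buf hb
    by_cases hc : c = ' '
    · have hsw : swSplit (c :: t) = ([], (swSplit t).1 :: (swSplit t).2) := by
        simp [swSplit, hc]
      rw [hsw]
      have hIH := ih [] (by simp)
      simp only [List.nil_append] at hIH
      match buf with
      | [] => simp [scanB, hc, hIH, joinW, tailJoin, chunks2]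
      | [b] => simp [scanB, hc, hIH, joinW, tailJoin, chunks2]
    · have hsw : swSplit (c :: t) = (c :: (swSplit t).1, (swSplit t).2) := by
        simp [swSplit, hc]
      rw [hsw]
      match buf with
      | [] =>
        have hIH := ih [c] (by simp)
        simp [scanB, hc, hIH]
      | [b] =>
        have hIH := ih [] (by simp)
        simp only [List.nil_append] at hIH
        simp [scanB, hc, hIH, joinW, chunks2]

-- ===== VERDICT (by name: the statement is the Claim_ definition above) =====
theorem generate_bi_graphemes_label_spec : Claim_equal_generate_bi_graphemes_label := by
  intro label _
  unfold Spec_generate_bi_graphemes_label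
  have hsplit : (PySem.Str.split? label " ").getD []
      = ((swSplit label.toList).1 :: (swSplit label.toList).2).map String.ofList := by
    rw [PySem.Str.split?]
    have hsep : " ".toList = [' '] := rfl
    have hchars : PySem.Chars.split? label.toList [' ']
        = some (PySem.Chars.splitOn label.toList [' ']) := by
      simp [PySem.Chars.split?]
    rw [hsep, hchars, splitOn_space]
    rfl
  -- A's side: split + chunk + separators = joinW of the split words
  have hA : generate_bi_graphemes_label label
      = joinW ((swSplit label.toList).1 :: (swSplit label.toList).2) := by
    unfold generate_bi_graphemes_label
    simp only [hsplit]
    rw [foldA_eq _ _ 0 [] (by norm_num)]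
    have hmm : ((((swSplit label.toList).1 :: (swSplit label.toList).2).map String.ofList).map
        String.toList) = (swSplit label.toList).1 :: (swSplit label.toList).2 := by
      simp [List.map_map, Function.comp_def]
    rw [hmm, List.nil_append]
  -- B's side: the scan = joinW of the split words
  have hB : generate_bi_graphemes_label_alt label
      = joinW ((swSplit label.toList).1 :: (swSplit label.toList).2) := by
    unfold generate_bi_graphemes_label_alt
    rw [foldB_eq label.toList [] [], scanB_eq label.toList [] (by simp), List.nil_append,
      List.nil_append]
  rw [hA, hB]
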